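-- pv_equiv track=rewrite | github.com/aehyemin/algorithm_solve | 2025_10/42626.py | solution
-- ===== SOURCE A (Python) =====
-- import heapq
--
-- def solution(scoville, K):
--     #두개를 꺼내서 하나로 만든다음 넣기
--     heapq.heapify(scoville)
--     ans = 0
--     #가장 작은값이 k이상이고 2개이상 요소가 있어야함
--     while scoville and scoville[0] < K:
--         if len(scoville) < 2:
--             return -1
--         a = heapq.heappop(scoville)
--         b = heapq.heappop(scoville)
--         new = a + b*2
--         heapq.heappush(scoville, new)
--         ans += 1
--     return ans
-- ===== SOURCE B (Python) =====
-- def solution(scoville, K):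
--     # Keep the pot fully sorted instead of a heap: pop the two smallest from the
--     # front and re-insert the mix in sorted position (front-scan insertion).
--     scoville.sort()
--     ans = 0
--     while scoville and scoville[0] < K:
--         if len(scoville) < 2:
--             return -1
--         a = scoville.pop(0)
--         b = scoville.pop(0)
--         new = a + b * 2
--         i = 0
--         while i < len(scoville) and scoville[i] < new:
--             i += 1
--         scoville.insert(i, new)
--         ans += 1
--     return ans
-- ===== Notes on version B (the rewrite author's own statement) =====
-- stated objective: alternative
-- what changed: Replaces the binary heap (heapify/heappop/heappush) by a fully sorted list: sort once, pop the two smallest from the front, and re-insert each mix at its sorted position by a scan.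
import Mathlib
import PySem

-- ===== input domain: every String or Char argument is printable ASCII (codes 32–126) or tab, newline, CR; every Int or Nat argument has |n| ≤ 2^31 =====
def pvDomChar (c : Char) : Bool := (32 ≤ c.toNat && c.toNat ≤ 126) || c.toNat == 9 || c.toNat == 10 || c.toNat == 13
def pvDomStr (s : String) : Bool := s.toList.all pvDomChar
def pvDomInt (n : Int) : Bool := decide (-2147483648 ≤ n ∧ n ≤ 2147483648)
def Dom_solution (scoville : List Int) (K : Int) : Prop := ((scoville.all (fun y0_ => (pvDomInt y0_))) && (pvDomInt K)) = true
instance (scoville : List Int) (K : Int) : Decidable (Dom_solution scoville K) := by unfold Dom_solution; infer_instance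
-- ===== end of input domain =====

-- B replaces A's binary heap by a fully sorted list (sort once, pop the two smallest from
-- the front, re-insert the mix at its sorted position): an alternative data structure with
-- the same return value. Both Pythons mutate `scoville` in place (A leaves it in heap
-- order, B in sorted order); the equivalence proved here is about the RETURN value only.

-- ===== PORT A =====
-- `heapq` is not covered by PySem; it is ported by hand as a binary min-heap (a skew
-- heap; `mergeF` carries a size-bound fuel only to make the recursion structural):
-- heappop returns the minimum Int, heappush adds one element. On Int values this is
-- exact for heapq's observable behaviour — the sequence of popped VALUES is determined
-- by the stored multiset (equal values are interchangeable) — which is all A's return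
-- value depends on.
inductive PvHeap
  | leaf
  | node : Int → PvHeap → PvHeap → PvHeap
deriving DecidableEq, Repr

def PvHeap.size : PvHeap → Nat
  | .leaf => 0
  | .node _ l r => 1 + l.size + r.size

def PvHeap.mergeF : Nat → PvHeap → PvHeap → PvHeap
  | _, .leaf, h => h
  | _, .node x l r, .leaf => .node x l r
  | 0, .node x l r, _ => .node x l r        -- never reached: the fuel bounds the sizes
  | n+1, .node x l r, .node y l' r' =>
      if x ≤ y then .node x (PvHeap.mergeF n r (.node y l' r')) l
      else .node y (PvHeap.mergeF n (.node x l r) r') l'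

def PvHeap.merge (a b : PvHeap) : PvHeap := PvHeap.mergeF (a.size + b.size) a b

-- heapq.heappush
def PvHeap.push (x : Int) (h : PvHeap) : PvHeap := PvHeap.merge (.node x .leaf .leaf) h

-- heapq.heapify
def pvHeapify (xs : List Int) : PvHeap := xs.foldl (fun h x => PvHeap.push x h) .leaf

-- the `while scoville and scoville[0] < K` loop; fuel = the initial length (the heap
-- shrinks by one element per iteration, so the fuel never runs out before the loop ends);
-- a = heappop(..) = the root, b = heappop(..) = the root of the merged children
def pvLoopA (K : Int) : Nat → PvHeap → Int → Int
  | 0, _, ans => ans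
  | _, .leaf, ans => ans
  | fuel+1, .node x hl hr, ans =>
    if x < K then
      if (PvHeap.node x hl hr).size < 2 then -1
      else
        match PvHeap.merge hl hr with
        | .leaf => -1                 -- never reached: the size is ≥ 2
        | .node b bl br =>
            pvLoopA K fuel (PvHeap.push (x + b * 2) (PvHeap.merge bl br)) (ans + 1)
    else ans

def solution (scoville : List Int) (K : Int) : Int :=
  pvLoopA K scoville.length (pvHeapify scoville) 0

-- ===== PORT B =====
-- Source B's front-scan insertion (`while i < len(scoville) and scoville[i] < new: i += 1`
-- then `scoville.insert(i, new)`) ported as one structural recursion; exact on all lists.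
def pvInsSorted (new : Int) : List Int → List Int
  | [] => [new]
  | x :: xs => if x < new then x :: pvInsSorted new xs else new :: x :: xs

-- Source B's `while scoville and scoville[0] < K` loop, same fuel discipline as A's port
def pvLoopB (K : Int) : Nat → List Int → Int → Int
  | 0, _, ans => ans
  | _+1, [], ans => ans
  | fuel+1, a :: rest, ans =>
    if a < K then
      match rest with
      | [] => -1                      -- len(scoville) < 2
      | b :: rest' => pvLoopB K fuel (pvInsSorted (a + b * 2) rest') (ans + 1)
    else ans

def solution_alt (scoville : List Int) (K : Int) : Int :=
  pvLoopB K scoville.length (PySem.List.sorted scoville (fun x => x) false) 0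

-- ===== PRECONDITION & SPEC =====
def Spec_solution (scoville : List Int) (K : Int) (out : Int) : Prop := out = solution_alt scoville K
instance (scoville : List Int) (K : Int) (out : Int) : Decidable (Spec_solution scoville K out) := by unfold Spec_solution; infer_instance

-- ===== CLAIM (what is proved, stated in full; the proofs are below) =====
def Claim_equal_solution : Prop := ∀ (scoville : List Int) (K : Int), Dom_solution scoville K → Spec_solution scoville K (solution scoville K)

-- ===== LEMMAS AND PROOFS =====

def PvHeap.toMul : PvHeap → Multiset Int
  | .leaf => 0
  | .node x l r => x ::ₘ (l.toMul + r.toMul)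

-- the min-heap property
def PvHeap.Ord : PvHeap → Prop
  | .leaf => True
  | .node x l r => (∀ y ∈ l.toMul, x ≤ y) ∧ (∀ y ∈ r.toMul, x ≤ y) ∧ l.Ord ∧ r.Ord

theorem pvHeap_toMul_mergeF : ∀ (n : Nat) (a b : PvHeap), a.size + b.size ≤ n →
    (PvHeap.mergeF n a b).toMul = a.toMul + b.toMul := by
  intro n
  induction n with
  | zero =>
      intro a b hab
      cases a with
      | leaf => simp [PvHeap.mergeF, PvHeap.toMul]
      | node x l r => simp [PvHeap.size] at hab
  | succ n ih =>
      intro a b hab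
      cases a with
      | leaf => simp [PvHeap.mergeF, PvHeap.toMul]
      | node x l r =>
        cases b with
        | leaf => simp [PvHeap.mergeF, PvHeap.toMul]
        | node y l' r' =>
          simp only [PvHeap.mergeF]
          simp only [PvHeap.size] at hab
          split
          · rw [PvHeap.toMul, ih r (.node y l' r') (by simp [PvHeap.size]; omega)]
            simp only [PvHeap.toMul, ← Multiset.singleton_add]
            abel
          · rw [PvHeap.toMul, ih (.node x l r) r' (by simp [PvHeap.size]; omega)]
            simp only [PvHeap.toMul, ← Multiset.singleton_add]
            abel

theorem pvHeap_mem_toMul_node {x : Int} {l r : PvHeap} {y : Int} :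
    y ∈ (PvHeap.node x l r).toMul ↔ y = x ∨ y ∈ l.toMul ∨ y ∈ r.toMul := by
  simp [PvHeap.toMul]

theorem pvHeap_root_min {x : Int} {l r : PvHeap} (h : (PvHeap.node x l r).Ord) :
    ∀ y ∈ (PvHeap.node x l r).toMul, x ≤ y := by
  intro y hy
  rcases pvHeap_mem_toMul_node.mp hy with rfl | hy | hy
  · exact le_refl _
  · exact h.1 y hy
  · exact h.2.1 y hy

theorem pvHeap_Ord_mergeF : ∀ (n : Nat) (a b : PvHeap), a.size + b.size ≤ n →
    a.Ord → b.Ord → (PvHeap.mergeF n a b).Ord := by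
  intro n
  induction n with
  | zero =>
      intro a b hab ha hb
      cases a with
      | leaf => simpa [PvHeap.mergeF]
      | node x l r => simp [PvHeap.size] at hab
  | succ n ih =>
      intro a b hab ha hb
      cases a with
      | leaf => simpa [PvHeap.mergeF]
      | node x l r =>
        cases b with
        | leaf => simpa [PvHeap.mergeF]
        | node y l' r' =>
          simp only [PvHeap.mergeF]
          simp only [PvHeap.size] at hab
          split
          · rename_i hxy
            refine ⟨?_, ha.1, ih r (.node y l' r') (by simp [PvHeap.size]; omega) ha.2.2.2 hb, ha.2.2.1⟩
            intro z hz
            rw [pvHeap_toMul_mergeF _ _ _ (by simp [PvHeap.size]; omega)] at hz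
            rcases Multiset.mem_add.mp hz with hz | hz
            · exact ha.2.1 z hz
            · exact le_trans hxy (pvHeap_root_min hb z hz)
          · rename_i hxy
            refine ⟨?_, hb.1, ih (.node x l r) r' (by simp [PvHeap.size]; omega) ha hb.2.2.2, hb.2.2.1⟩
            intro z hz
            rw [pvHeap_toMul_mergeF _ _ _ (by simp [PvHeap.size]; omega)] at hz
            rcases Multiset.mem_add.mp hz with hz | hz
            · exact le_trans (le_of_lt (lt_of_not_ge hxy)) (pvHeap_root_min ha z hz)
            · exact hb.2.1 z hz

theorem pvHeap_toMul_merge (a b : PvHeap) : (PvHeap.merge a b).toMul = a.toMul + b.toMul :=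
  pvHeap_toMul_mergeF _ a b le_rfl

theorem pvHeap_Ord_merge (a b : PvHeap) (ha : a.Ord) (hb : b.Ord) : (PvHeap.merge a b).Ord :=
  pvHeap_Ord_mergeF _ a b le_rfl ha hb

theorem pvHeap_toMul_push (x : Int) (h : PvHeap) : (PvHeap.push x h).toMul = x ::ₘ h.toMul := by
  simp [PvHeap.push, pvHeap_toMul_merge, PvHeap.toMul]

theorem pvHeap_Ord_push (x : Int) (h : PvHeap) (hh : h.Ord) : (PvHeap.push x h).Ord := by
  refine pvHeap_Ord_merge _ _ ?_ hh
  exact ⟨by simp [PvHeap.toMul], by simp [PvHeap.toMul], trivial, trivial⟩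

theorem pvHeap_card_toMul (h : PvHeap) : Multiset.card h.toMul = h.size := by
  induction h with
  | leaf => simp [PvHeap.toMul, PvHeap.size]
  | node x l r ihl ihr => simp [PvHeap.toMul, PvHeap.size, ihl, ihr]; omega

theorem pvHeap_toMul_eq_zero {h : PvHeap} (hz : h.toMul = 0) : h = .leaf := by
  cases h with
  | leaf => rfl
  | node x l r => simp [PvHeap.toMul] at hz

theorem pvHeapify_fold (xs : List Int) : ∀ (h : PvHeap), h.Ord →
    ((xs.foldl (fun h x => PvHeap.push x h) h).toMul = h.toMul + ↑xs ∧
     (xs.foldl (fun h x => PvHeap.push x h) h).Ord) := by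
  induction xs with
  | nil => intro h hh; simp [hh]
  | cons x xs ih =>
      intro h hh
      have := ih (PvHeap.push x h) (pvHeap_Ord_push x h hh)
      refine ⟨?_, this.2⟩
      rw [List.foldl_cons, this.1, pvHeap_toMul_push, ← Multiset.cons_coe]
      simp only [← Multiset.singleton_add]
      abel

theorem pvHeapify_spec (xs : List Int) : (pvHeapify xs).toMul = ↑xs ∧ (pvHeapify xs).Ord := by
  have := pvHeapify_fold xs .leaf trivial
  simpa [pvHeapify, PvHeap.toMul] using this

theorem pvInsSorted_coe (n : Int) (l : List Int) :
    ((pvInsSorted n l : List Int) : Multiset Int) = n ::ₘ ↑l := by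
  induction l with
  | nil => simp [pvInsSorted]
  | cons x xs ih =>
      simp only [pvInsSorted]
      split
      · rw [← Multiset.cons_coe, ih, Multiset.cons_swap, Multiset.cons_coe]
      · rw [← Multiset.cons_coe]

theorem pvInsSorted_mem {n y : Int} {l : List Int} : y ∈ pvInsSorted n l ↔ y = n ∨ y ∈ l := by
  have h := pvInsSorted_coe n l
  constructor
  · intro hy
    have h2 : y ∈ ((pvInsSorted n l : List Int) : Multiset Int) := Multiset.mem_coe.mpr hy
    rw [h] at h2
    simpa using h2
  · intro hy
    have h2 : y ∈ (n ::ₘ (↑l : Multiset Int)) := by simpa using hy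
    rw [← h] at h2
    exact Multiset.mem_coe.mp h2

theorem pvInsSorted_length (n : Int) (l : List Int) :
    (pvInsSorted n l).length = l.length + 1 := by
  have h := congrArg Multiset.card (pvInsSorted_coe n l)
  simpa using h

theorem pvInsSorted_sorted (n : Int) : ∀ (l : List Int), l.Pairwise (· ≤ ·) →
    (pvInsSorted n l).Pairwise (· ≤ ·) := by
  intro l
  induction l with
  | nil => intro _; simp [pvInsSorted]
  | cons x xs ih =>
      intro h
      rw [List.pairwise_cons] at h
      simp only [pvInsSorted]
      split
      · rename_i hlt
        rw [List.pairwise_cons]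
        refine ⟨?_, ih h.2⟩
        intro y hy
        rcases pvInsSorted_mem.mp hy with rfl | hy
        · exact le_of_lt hlt
        · exact h.1 y hy
      · rename_i hge
        rw [List.pairwise_cons]
        refine ⟨?_, List.pairwise_cons.mpr h⟩
        intro y hy
        rcases hy with _ | hy
        · exact le_of_not_gt hge
        · exact le_trans (le_of_not_gt hge) (h.1 y (by assumption))

-- the root of an ordered heap equals the head of a sorted list with the same multiset
theorem pv_root_eq_head {x : Int} {hl hr : PvHeap} {a : Int} {rest : List Int}
    (ho : (PvHeap.node x hl hr).Ord)
    (hs : (a :: rest).Pairwise (· ≤ ·))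
    (hm : (PvHeap.node x hl hr).toMul = ↑(a :: rest)) : x = a := by
  have hxmem : x ∈ ((↑(a :: rest) : Multiset Int)) := by
    rw [← hm]; exact pvHeap_mem_toMul_node.mpr (Or.inl rfl)
  have hamem : a ∈ (PvHeap.node x hl hr).toMul := by
    rw [hm]; simp
  have h1 : x ≤ a := pvHeap_root_min ho a hamem
  have h2 : a ≤ x := by
    rcases List.mem_cons.mp (Multiset.mem_coe.mp hxmem) with heq | hmem
    · omega
    · exact (List.pairwise_cons.mp hs).1 x hmem
  omega

theorem pvLoop_eq (K : Int) : ∀ (fuel : Nat) (h : PvHeap) (l : List Int) (ans : Int),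
    h.Ord → l.Pairwise (· ≤ ·) → h.toMul = ↑l → l.length ≤ fuel →
    pvLoopA K fuel h ans = pvLoopB K fuel l ans := by
  intro fuel
  induction fuel with
  | zero => intro h l ans _ _ _ _; rfl
  | succ n ih =>
      intro h l ans ho hs hm hlen
      cases l with
      | nil =>
          have : h = .leaf := pvHeap_toMul_eq_zero (by simpa using hm)
          subst this
          rfl
      | cons a rest =>
          cases h with
          | leaf =>
              exfalso
              have hc := congrArg Multiset.card hm
              simp [PvHeap.toMul] at hc
          | node x hl hr =>
            have hxa : x = a := pv_root_eq_head ho hs hm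
            subst hxa
            simp only [pvLoopA, pvLoopB]
            by_cases hK : x < K
            · simp only [if_pos hK]
              have hml : hl.toMul + hr.toMul = ↑rest := by
                have : x ::ₘ (hl.toMul + hr.toMul) = x ::ₘ ↑rest := by
                  rw [← PvHeap.toMul, hm]; simp
                exact (Multiset.cons_inj_right x).mp this
              have hsz : hl.size + hr.size = rest.length := by
                have hc := congrArg Multiset.card hml
                simpa [pvHeap_card_toMul] using hc
              cases rest with
              | nil =>
                  have hlt : (PvHeap.node x hl hr).size < 2 := by
                    simp only [List.length_nil] at hsz
                    simp only [PvHeap.size]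
                    omega
                  simp [hlt]
              | cons b rest' =>
                  simp only [List.length_cons] at hsz
                  have hns : ¬ (PvHeap.node x hl hr).size < 2 := by
                    simp only [PvHeap.size]
                    omega
                  simp only [if_neg hns]
                  have hOm : (PvHeap.merge hl hr).Ord :=
                    pvHeap_Ord_merge hl hr ho.2.2.1 ho.2.2.2
                  have hMm : (PvHeap.merge hl hr).toMul = ↑(b :: rest') := by
                    rw [pvHeap_toMul_merge, hml]
                  have hs' : (b :: rest').Pairwise (· ≤ ·) :=
                    (List.pairwise_cons.mp hs).2
                  cases hM : PvHeap.merge hl hr with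
                  | leaf =>
                      exfalso
                      rw [hM] at hMm
                      have hc := congrArg Multiset.card hMm
                      simp [PvHeap.toMul] at hc
                  | node y Ml Mr =>
                      rw [hM] at hOm hMm
                      have hyb : y = b := pv_root_eq_head hOm hs' hMm
                      subst hyb
                      have hml' : Ml.toMul + Mr.toMul = ↑rest' := by
                        have : y ::ₘ (Ml.toMul + Mr.toMul) = y ::ₘ ↑rest' := by
                          rw [← PvHeap.toMul, hMm]; simp
                        exact (Multiset.cons_inj_right y).mp this
                      apply ih
                      · exact pvHeap_Ord_push _ _ (pvHeap_Ord_merge Ml Mr hOm.2.2.1 hOm.2.2.2)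
                      · exact pvInsSorted_sorted _ _ ((List.pairwise_cons.mp hs').2)
                      · rw [pvHeap_toMul_push, pvHeap_toMul_merge, hml', pvInsSorted_coe]
                      · rw [pvInsSorted_length]
                        simp only [List.length_cons] at hlen
                        omega
            · simp [if_neg hK]

-- ===== VERDICT (by name: the statement is the Claim_ definition above) =====
theorem solution_spec : Claim_equal_solution := by
  intro scoville K _
  unfold Spec_solution solution solution_alt
  obtain ⟨hm, ho⟩ := pvHeapify_spec scoville
  apply pvLoop_eq
  · exact ho
  · simpa using PySem.List.sorted_pairwise scoville (fun x => x)
  · rw [hm]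
    exact (Multiset.coe_eq_coe.mpr (PySem.List.sorted_perm scoville (fun x => x) false)).symm
  · rw [PySem.List.length_sorted]
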